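-- pv_equiv track=rewrite | github.com/elshadaghazade/crash_course_tasks | Group3/18-Polindromic-Integer/solved.py | find_litcher_numbers
-- ===== SOURCE A (Python) =====
-- def find_litcher_numbers(number1, number2):
--     """Finds count of litcher number and list of them between number1 and number2 (inclusive)"""
--     def is_litcher(number, step=1):
--         number = str(number)
--
--         if step >= 60:
--             return True
--         elif number != number[::-1]:
--             return is_litcher(int(number) + int(number[::-1]), step + 1)
--         else:
--             return False
--
--     cnt = 0
--     numbers = []
--
--     for number in range(number1, number2+1):
--         if is_litcher(number):
--             cnt += 1
--             numbers.append(number)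
--
--     return cnt, numbers
-- ===== SOURCE B (Python) =====
-- def find_litcher_numbers(number1, number2):
--     """Finds count of litcher number and list of them between number1 and number2 (inclusive)"""
--     def is_litcher(number):
--         for _ in range(59):
--             s = str(number)
--             r = s[::-1]
--             if s == r:
--                 return False
--             number = int(s) + int(r)
--         return True
--
--     numbers = [n for n in range(number1, number2 + 1) if is_litcher(n)]
--     return len(numbers), numbers
-- ===== Notes on version B (the rewrite author's own statement) =====
-- stated objective: simpler
-- what changed: is_litcher's tail recursion with an explicit step counter becomes a plain 59-iteration loop, and the outer counting loop with two mutable accumulators becomes a list comprehension whose length is the count.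
import Mathlib
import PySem

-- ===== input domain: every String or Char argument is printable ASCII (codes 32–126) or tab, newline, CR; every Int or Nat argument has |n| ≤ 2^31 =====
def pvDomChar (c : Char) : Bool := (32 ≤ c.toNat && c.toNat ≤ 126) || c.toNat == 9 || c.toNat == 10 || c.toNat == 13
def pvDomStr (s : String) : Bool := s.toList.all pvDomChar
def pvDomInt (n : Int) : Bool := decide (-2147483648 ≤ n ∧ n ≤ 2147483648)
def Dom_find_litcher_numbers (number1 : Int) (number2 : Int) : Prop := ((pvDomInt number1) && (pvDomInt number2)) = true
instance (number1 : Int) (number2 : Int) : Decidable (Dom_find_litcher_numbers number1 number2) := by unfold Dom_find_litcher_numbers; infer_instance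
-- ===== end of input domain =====

-- B replaces A's recursive is_litcher (explicit step counter) by a 59-iteration loop, and A's
-- outer loop with two mutable accumulators by a list comprehension plus len(); same behaviour.

-- ===== PORT A =====
-- is_litcher(number, step): recursion counting step upward; `none` = the ValueError int() raises
-- on a negative number's reversed string (excluded by Pre_).
def pvIsLitcherA (number : Int) (step : Int) : Option Bool :=
  let s := PySem.Int.toChars number
  if 60 ≤ step then some true
  else if s ≠ s.reverse then
    match PySem.Int.ofChars? s, PySem.Int.ofChars? s.reverse with
    | some a, some b => pvIsLitcherA (a + b) (step + 1)
    | _, _ => none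
  else some false
termination_by (60 - step).toNat
decreasing_by omega

def find_litcher_numbers (number1 : Int) (number2 : Int) : Int × List Int :=
  ((PySem.List.pyRange number1 (number2 + 1) 1).foldl
    (fun st number => st.bind (fun cn =>
      match pvIsLitcherA number 1 with
      | some true => some (cn.1 + 1, cn.2 ++ [number])
      | some false => some cn
      | none => none))
    (some ((0 : Int), ([] : List Int)))).getD (0, [])

-- ===== PORT B =====
-- is_litcher(number): a for-loop over range(59); `Except.error r` models an early
-- `return r` (r = none being the ValueError, excluded by Pre_), `Except.ok n` the live loop state.
def pvIsLitcherB (number : Int) : Option Bool :=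
  match (PySem.List.pyRange 0 59 1).foldl
    (fun st _ => match st with
      | .error r => .error r
      | .ok n =>
        let s := PySem.Int.toChars n
        let r := s.reverse
        if s = r then .error (some false)
        else match PySem.Int.ofChars? s, PySem.Int.ofChars? r with
          | some a, some b => Except.ok (a + b)
          | _, _ => .error none)
    (Except.ok number) with
  | .error r => r
  | .ok _ => some true

-- the list comprehension [n for n in … if g(n)], guard g abstracted; `none` = a ValueError inside it
def pvCompWith (g : Int → Option Bool) : List Int → Option (List Int)
  | [] => some []
  | n :: rest =>
    match g n with
    | some true => (pvCompWith g rest).map (n :: ·)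
    | some false => pvCompWith g rest
    | none => none

def find_litcher_numbers_alt (number1 : Int) (number2 : Int) : Int × List Int :=
  match pvCompWith pvIsLitcherB (PySem.List.pyRange number1 (number2 + 1) 1) with
  | some numbers => ((numbers.length : Int), numbers)
  | none => (0, [])

-- ===== PRECONDITION & SPEC =====
-- Pre_ excludes exactly the inputs on which Python A raises ValueError: a non-empty range that
-- starts at a negative number (int() of the reversed string of a negative number fails).
def Pre_find_litcher_numbers (number1 : Int) (number2 : Int) : Prop :=
  0 ≤ number1 ∨ number2 < number1
instance (number1 : Int) (number2 : Int) : Decidable (Pre_find_litcher_numbers number1 number2) := by unfold Pre_find_litcher_numbers; infer_instance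

def pvWitness_find_litcher_numbers : Int × Int := (190, 200)

def Spec_find_litcher_numbers (number1 : Int) (number2 : Int) (out : Int × List Int) : Prop := out = find_litcher_numbers_alt number1 number2
instance (number1 : Int) (number2 : Int) (out : Int × List Int) : Decidable (Spec_find_litcher_numbers number1 number2 out) := by unfold Spec_find_litcher_numbers; infer_instance

-- ===== CLAIM (what is proved, stated in full; the proofs are below) =====
def Claim_equal_find_litcher_numbers : Prop := ∀ (number1 : Int) (number2 : Int), Dom_find_litcher_numbers number1 number2 → Pre_find_litcher_numbers number1 number2 → Spec_find_litcher_numbers number1 number2 (find_litcher_numbers number1 number2)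

-- ===== LEMMAS AND PROOFS =====

-- an early `return` freezes the loop state
theorem pvFoldErr (l : List Int) (r : Option Bool)
    (f : Except (Option Bool) Int → Int → Except (Option Bool) Int)
    (hf : ∀ r' x, f (.error r') x = .error r') :
    l.foldl f (.error r) = .error r := by
  induction l with
  | nil => rfl
  | cons y ys ihe => simp [List.foldl, hf, ihe]

-- B's loop with k iterations left equals A's recursion at step 60 - k
theorem pvKey (l : List Int) (n : Int) (h : l.length ≤ 59) :
    (match l.foldl
      (fun st _ => match st with
        | .error r => .error r
        | .ok n =>
          let s := PySem.Int.toChars n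
          let r := s.reverse
          if s = r then .error (some false)
          else match PySem.Int.ofChars? s, PySem.Int.ofChars? r with
            | some a, some b => Except.ok (a + b)
            | _, _ => .error none)
      (Except.ok n) with
    | .error r => r
    | .ok _ => some true)
    = pvIsLitcherA n (60 - (l.length : Int)) := by
  induction l generalizing n with
  | nil =>
    rw [pvIsLitcherA]
    simp
  | cons x xs ih =>
    simp only [List.length_cons] at h ⊢
    rw [pvIsLitcherA]
    simp only [List.foldl_cons]
    rw [if_neg (show ¬ (60:Int) ≤ 60 - ((xs.length + 1 : Nat) : Int) from by push_cast; omega)]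
    by_cases hp : PySem.Int.toChars n = (PySem.Int.toChars n).reverse
    · rw [if_neg (not_not_intro hp)]
      simp only [if_pos hp]
      rw [pvFoldErr _ _ _ (fun _ _ => rfl)]
    · rw [if_pos hp]
      simp only [if_neg hp]
      cases ha : PySem.Int.ofChars? (PySem.Int.toChars n) with
      | none => rw [pvFoldErr _ _ _ (fun _ _ => rfl)]
      | some a =>
        cases hb : PySem.Int.ofChars? (PySem.Int.toChars n).reverse with
        | none => rw [pvFoldErr _ _ _ (fun _ _ => rfl)]
        | some b =>
          rw [ih (a + b) (by omega)]
          congr 1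
          push_cast
          ring

theorem pvIsLitcher_eq (n : Int) : pvIsLitcherB n = pvIsLitcherA n 1 := by
  have hlen : (PySem.List.pyRange 0 59 1).length = 59 := by
    rw [PySem.List.length_pyRange_one]; rfl
  unfold pvIsLitcherB
  rw [pvKey _ _ (by rw [hlen])]
  rw [hlen]
  norm_num

-- unfolding equations for pvCompWith (stated by hand; the guard stays symbolic so rfl is cheap)
theorem pvCompWith_nil (g : Int → Option Bool) : pvCompWith g [] = some [] := rfl
theorem pvCompWith_cons (g : Int → Option Bool) (n : Int) (rest : List Int) :
    pvCompWith g (n :: rest) =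
    match g n with
    | some true => (pvCompWith g rest).map (n :: ·)
    | some false => pvCompWith g rest
    | none => none := rfl

-- a raised ValueError ends the outer loop: folding from `none` stays `none`
theorem pvFoldNone (l : List Int)
    (f : Option (Int × List Int) → Int → Option (Int × List Int))
    (hf : ∀ x, f none x = none) :
    l.foldl f none = none := by
  induction l with
  | nil => rfl
  | cons y ys ihe => simp [List.foldl, hf, ihe]

-- A's accumulating fold, started at (c, acc), is the comprehension's result shifted by (c, acc)
theorem pvFoldComp (l : List Int) (c : Int) (acc : List Int) :
    l.foldl
      (fun st number => st.bind (fun cn =>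
        match pvIsLitcherA number 1 with
        | some true => some (cn.1 + 1, cn.2 ++ [number])
        | some false => some cn
        | none => none))
      (some (c, acc))
    = (pvCompWith pvIsLitcherB l).map (fun ns => (c + (ns.length : Int), acc ++ ns)) := by
  induction l generalizing c acc with
  | nil => simp [pvCompWith_nil]
  | cons x xs ih =>
    rw [List.foldl_cons, pvCompWith_cons, pvIsLitcher_eq]
    cases hx : pvIsLitcherA x 1 with
    | none =>
      simp only [Option.bind_some]
      exact (pvFoldNone xs _ (fun _ => rfl)).trans rfl
    | some b =>
      cases b with
      | true =>
        simp only [Option.bind_some, ih]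
        cases pvCompWith pvIsLitcherB xs with
        | none => rfl
        | some ns =>
          simp only [Option.map_some]
          refine congrArg some (Prod.ext ?_ ?_)
          · simp
            ring
          · simp
      | false =>
        simp only [Option.bind_some]
        exact ih c acc

-- ===== VERDICT (by name: the statement is the Claim_ definition above) =====
theorem find_litcher_numbers_spec : Claim_equal_find_litcher_numbers := by
  intro number1 number2 _ _
  unfold Spec_find_litcher_numbers find_litcher_numbers find_litcher_numbers_alt
  rw [pvFoldComp]
  cases pvCompWith pvIsLitcherB (PySem.List.pyRange number1 (number2 + 1) 1) with
  | none => rfl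
  | some ns => simp
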